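-- pv_equiv track=rewrite | github.com/bboerschinger/tacl | scripts/reinsertStress.py | getBVec
-- ===== SOURCE A (Python) =====
-- def getBVec(t):
--     """get a vector-representation of a segmentation, 's' indicates syllable, 'b' a word-boundary, 'n' absence of a boundary"""
--     res = []
--     pos = 1
--     while pos<len(t):
--         if t[pos]==".":
--             res.append("s")
--             pos+=2
--         elif t[pos]==" ":
--             res.append("b")
--             pos+=2
--         else:
--             res.append("n")
--             pos+=1
--     return res
-- ===== SOURCE B (Python) =====
-- import re
--
-- def getBVec(t):
--     """get a vector-representation of a segmentation, 's' indicates syllable, 'b' a word-boundary, 'n' absence of a boundary"""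
--     tokens = re.findall(r'[. ].?|.', t[1:], re.DOTALL)
--     return ["s" if tok[0] == "." else "b" if tok[0] == " " else "n" for tok in tokens]
-- ===== Notes on version B (the rewrite author's own statement) =====
-- stated objective: idiomatic
-- what changed: Replaced the manual index-stepping while loop with one re.findall tokenization (a marker plus its following char, or any single char) and a comprehension mapping each token to its label.
import Mathlib
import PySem

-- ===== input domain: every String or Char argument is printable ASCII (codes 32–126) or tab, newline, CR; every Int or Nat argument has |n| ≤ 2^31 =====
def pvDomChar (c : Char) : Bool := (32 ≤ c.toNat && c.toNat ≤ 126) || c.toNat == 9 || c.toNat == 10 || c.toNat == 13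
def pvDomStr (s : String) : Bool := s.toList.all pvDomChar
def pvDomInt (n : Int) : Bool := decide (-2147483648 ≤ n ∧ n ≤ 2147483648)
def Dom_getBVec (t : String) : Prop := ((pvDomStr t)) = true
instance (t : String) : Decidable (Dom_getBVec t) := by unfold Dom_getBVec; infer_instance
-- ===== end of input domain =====

-- B replaces A's index-stepping while loop by a regex-style tokenization of t[1:] plus a label map (idiomatic; same cost).

-- ===== PORT A =====
-- A's while loop: pos starts at 1, appends per step, advancing by 2 after '.' or ' ', else by 1.
def getBVecGo (t : List Char) (pos : Nat) : List String :=
  if h : pos < t.length then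
    if t[pos] = '.' then "s" :: getBVecGo t (pos + 2)
    else if t[pos] = ' ' then "b" :: getBVecGo t (pos + 2)
    else "n" :: getBVecGo t (pos + 1)
  else []
termination_by t.length - pos

def getBVec (t : String) : List String := getBVecGo t.toList 1

-- ===== PORT B =====
-- tokenization performed in Source B by re.findall(r'[. ].?|.', t[1:], re.DOTALL): a '.' or ' '
-- grabs its following character (if any) into one token; any other character is a token alone.
def getBVecTokens : List Char → List (List Char)
  | [] => []
  | c :: rest =>
    if c = '.' ∨ c = ' ' then
      match rest with
      | [] => [[c]]
      | d :: rest' => (c :: [d]) :: getBVecTokens rest'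
    else [c] :: getBVecTokens rest

def getBVecLabel (tok : List Char) : String :=
  if tok.head? = some '.' then "s" else if tok.head? = some ' ' then "b" else "n"

def getBVec_alt (t : String) : List String :=
  (getBVecTokens (t.toList.drop 1)).map getBVecLabel

-- ===== PRECONDITION & SPEC =====
def Spec_getBVec (t : String) (out : List String) : Prop := out = getBVec_alt t
instance (t : String) (out : List String) : Decidable (Spec_getBVec t out) := by unfold Spec_getBVec; infer_instance

-- ===== CLAIM (what is proved, stated in full; the proofs are below) =====
def Claim_equal_getBVec : Prop := ∀ (t : String), Dom_getBVec t → Spec_getBVec t (getBVec t)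

-- ===== LEMMAS AND PROOFS =====

theorem drop_cons_of_lt (t : List Char) (pos : Nat) (h : pos < t.length) :
    List.drop pos t = t[pos] :: List.drop (pos + 1) t := List.drop_eq_getElem_cons h

theorem drop_tail_eq (t : List Char) (pos : Nat) (d : Char) (rest' : List Char)
    (hd2 : List.drop (pos + 1) t = d :: rest') : rest' = List.drop (pos + 2) t := by
  have := congrArg List.tail hd2
  simpa using this.symm

theorem drop_len_le (t : List Char) (pos : Nat)
    (hd2 : List.drop (pos + 1) t = ([] : List Char)) : t.length ≤ pos + 1 := by
  by_contra hc
  rw [Nat.not_le] at hc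
  rw [drop_cons_of_lt t (pos + 1) hc] at hd2
  simp at hd2
  omega

theorem getBVecGo_eq_tokens (t : List Char) (n pos : Nat) (hn : t.length - pos ≤ n) :
    getBVecGo t pos = (getBVecTokens (t.drop pos)).map getBVecLabel := by
  induction n generalizing pos with
  | zero =>
    have h : ¬(pos < t.length) := by omega
    rw [getBVecGo, dif_neg h, List.drop_eq_nil_of_le (by omega)]
    rfl
  | succ n ih =>
    by_cases h : pos < t.length
    . rw [getBVecGo, dif_pos h, drop_cons_of_lt t pos h]
      by_cases hdot : t[pos] = '.'
      . rw [if_pos hdot, ih (pos + 2) (by omega)]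
        cases hd2 : List.drop (pos + 1) t with
        | nil =>
          rw [List.drop_eq_nil_of_le (by have := drop_len_le t pos hd2; omega)]
          simp [getBVecTokens, getBVecLabel, hdot]
        | cons d rest' =>
          rw [← drop_tail_eq t pos d rest' hd2]
          simp [getBVecTokens, getBVecLabel, hdot]
      . by_cases hsp : t[pos] = ' '
        . rw [if_neg hdot, if_pos hsp, ih (pos + 2) (by omega)]
          cases hd2 : List.drop (pos + 1) t with
          | nil =>
            rw [List.drop_eq_nil_of_le (by have := drop_len_le t pos hd2; omega)]
            simp [getBVecTokens, getBVecLabel, hsp]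
          | cons d rest' =>
            rw [← drop_tail_eq t pos d rest' hd2]
            simp [getBVecTokens, getBVecLabel, hsp]
        . rw [if_neg hdot, if_neg hsp, ih (pos + 1) (by omega)]
          cases hd2 : List.drop (pos + 1) t with
          | nil =>
            simp [getBVecTokens, getBVecLabel, hdot, hsp]
          | cons d rest' =>
            simp [getBVecTokens, getBVecLabel, hdot, hsp]
    . rw [getBVecGo, dif_neg h, List.drop_eq_nil_of_le (by omega)]
      rfl

-- ===== VERDICT (by name: the statement is the Claim_ definition above) =====
theorem getBVec_spec : Claim_equal_getBVec := by
  intro t _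
  unfold Spec_getBVec getBVec getBVec_alt
  exact getBVecGo_eq_tokens t.toList t.toList.length 1 (by omega)
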